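-- pv_equiv track=rewrite | github.com/SherzodOtajonov/cp-stuff | google_kick_start/2020/round_c/problem_a.py | solve
-- ===== SOURCE A (Python) =====
-- def solve(n, k, a):
--     c=1
--     r=0
--     for i in range(1, n):
--         if a[i-1] -  a[i] == 1:
--             c+=1
--         else: c=1
--         if a[i] == 1  and c>=k:
--             r+=1
--             c=1
--
--     return r
-- ===== SOURCE B (Python) =====
-- def solve(n, k, a):
--     r = 0
--     for i in range(1, n):
--         if a[i] == 1 and i + 1 >= k and all(a[i - j] == j + 1 for j in range(k)):
--             r += 1
--     return r
-- ===== Notes on version B (the rewrite author's own statement) =====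
-- stated objective: alternative
-- what changed: Replaces A's running run-length counter with resets by a stateless per-terminal look-back: for each position holding 1, directly check that the k preceding elements form the countdown k,...,1.
import Mathlib
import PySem

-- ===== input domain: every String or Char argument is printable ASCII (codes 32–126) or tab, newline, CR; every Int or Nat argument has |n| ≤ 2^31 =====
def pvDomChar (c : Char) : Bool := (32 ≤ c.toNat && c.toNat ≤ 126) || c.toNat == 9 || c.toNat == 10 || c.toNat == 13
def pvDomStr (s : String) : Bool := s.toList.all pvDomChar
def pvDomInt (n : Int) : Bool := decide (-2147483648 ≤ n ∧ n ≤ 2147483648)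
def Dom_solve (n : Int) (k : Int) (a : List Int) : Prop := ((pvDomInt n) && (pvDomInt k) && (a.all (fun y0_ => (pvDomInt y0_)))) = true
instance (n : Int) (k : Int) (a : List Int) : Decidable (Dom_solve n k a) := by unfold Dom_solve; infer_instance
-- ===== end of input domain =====

-- B replaces A's running run-length counter (with resets) by a stateless per-terminal
-- look-back check of the k enclosing elements; alternative decomposition, same results.

-- ===== PORT A =====
-- A: single pass keeping a run counter c of consecutive "descend by 1" steps; counts
-- positions i ≥ 1 with a[i] == 1 and c >= k, resetting c after a hit.
def solve (n : Int) (k : Int) (a : List Int) : Int :=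
  ((PySem.List.pyRange 1 n 1).foldl (fun (st : Int × Int) i =>
    let c := if PySem.List.pyGetD a (i-1) 0 - PySem.List.pyGetD a i 0 = 1 then st.1 + 1 else 1
    if PySem.List.pyGetD a i 0 = 1 ∧ k ≤ c then (1, st.2 + 1) else (c, st.2)) (1, 0)).2

-- ===== PORT B =====
-- B: for each i in range(1, n), count it iff a[i] == 1, i+1 >= k and
-- all(a[i-j] == j+1 for j in range(k)).
def solve_alt (n : Int) (k : Int) (a : List Int) : Int :=
  (PySem.List.pyRange 1 n 1).foldl (fun r i =>
    if PySem.List.pyGetD a i 0 = 1 ∧ k ≤ i + 1 ∧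
        ∀ j ∈ PySem.List.pyRange 0 k 1, PySem.List.pyGetD a (i - j) 0 = j + 1
    then r + 1 else r) 0

-- ===== PRECONDITION & SPEC =====
-- Pre excludes exactly the inputs where A raises IndexError: n ≥ 2 with fewer than n
-- elements in a (the loop reads a[1..n-1]); B raises there as well.
def Pre_solve (n : Int) (k : Int) (a : List Int) : Prop := n ≤ (a.length : Int) ∨ n ≤ 1
instance (n : Int) (k : Int) (a : List Int) : Decidable (Pre_solve n k a) := by unfold Pre_solve; infer_instance
def pvWitness_solve : Int × Int × List Int := (4, 2, [3, 2, 1, 0])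
def Spec_solve (n : Int) (k : Int) (a : List Int) (out : Int) : Prop := out = solve_alt n k a
instance (n : Int) (k : Int) (a : List Int) (out : Int) : Decidable (Spec_solve n k a out) := by unfold Spec_solve; infer_instance

-- ===== CLAIM (what is proved, stated in full; the proofs are below) =====
def Claim_equal_solve : Prop := ∀ (n : Int) (k : Int) (a : List Int), Dom_solve n k a → Pre_solve n k a → Spec_solve n k a (solve n k a)

-- ===== LEMMAS AND PROOFS =====

-- length of the maximal "descend by 1" run of a ending at index i (at least 1)
def runLen (a : List Int) : Nat → Int
  | 0 => 1
  | i + 1 => if a.getD i 0 - a.getD (i+1) 0 = 1 then runLen a i + 1 else 1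

lemma runLen_succ (a : List Int) (i : Nat) :
    runLen a (i+1) = if a.getD i 0 - a.getD (i+1) 0 = 1 then runLen a i + 1 else 1 := rfl

lemma runLen_pos (a : List Int) (i : Nat) : 1 ≤ runLen a i := by
  induction i with
  | zero => simp [runLen]
  | succ i ih => simp only [runLen]; split <;> omega

-- characterisation: k ≤ runLen a i iff the k elements ending at i ascend by 1 leftwards
lemma runLen_char (a : List Int) : ∀ (i : Nat) (M : Int),
    M ≤ runLen a i ↔ (M ≤ (i : Int) + 1 ∧ ∀ j : Nat, (j : Int) < M → a.getD (i - j) 0 = a.getD i 0 + j) := by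
  intro i
  induction i with
  | zero =>
    intro M
    constructor
    · intro h
      refine ⟨by simpa [runLen] using h, ?_⟩
      intro j hj
      have hM : M ≤ 1 := by simpa [runLen] using h
      have : j = 0 := by omega
      subst this; simp
    · intro ⟨h, _⟩; simpa [runLen] using h
  | succ i ih =>
    intro M
    by_cases hd : a.getD i 0 - a.getD (i+1) 0 = 1
    · rw [runLen_succ, if_pos hd]
      constructor
      · intro h
        have h' := (ih (M - 1)).mp (by omega)
        refine ⟨by omega, ?_⟩
        intro j hj
        match j with
        | 0 => simp
        | j' + 1 =>
          have := h'.2 j' (by push_cast at hj ⊢; omega)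
          have hidx : i + 1 - (j' + 1) = i - j' := by omega
          rw [hidx]
          push_cast
          push_cast at this
          omega
      · intro ⟨h1, h2⟩
        have : M - 1 ≤ runLen a i := by
          apply (ih (M - 1)).mpr
          refine ⟨by omega, ?_⟩
          intro j hj
          have := h2 (j + 1) (by push_cast; omega)
          have hidx : i + 1 - (j + 1) = i - j := by omega
          rw [hidx] at this
          push_cast at this ⊢
          omega
        omega
    · rw [runLen_succ, if_neg hd]
      constructor
      · intro h
        refine ⟨by omega, ?_⟩
        intro j hj
        have : j = 0 := by omega
        subst this; simp
      · intro ⟨h1, h2⟩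
        by_contra hM
        have h2' := h2 1 (by omega)
        have h2'' : a.getD i 0 = a.getD (i+1) 0 + 1 := by exact_mod_cast h2'
        omega

-- loop invariant on A's counter entering iteration m+1
def InvA (a : List Int) (m : Nat) (c : Int) : Prop :=
  1 ≤ c ∧ c ≤ runLen a m ∧ (c < runLen a m → a.getD m 0 = 2 - c)

def stepA (k : Int) (a : List Int) (st : Int × Int) (i : Int) : Int × Int :=
  let c := if PySem.List.pyGetD a (i-1) 0 - PySem.List.pyGetD a i 0 = 1 then st.1 + 1 else 1
  if PySem.List.pyGetD a i 0 = 1 ∧ k ≤ c then (1, st.2 + 1) else (c, st.2)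

def stepB (k : Int) (a : List Int) (r : Int) (i : Int) : Int :=
  if PySem.List.pyGetD a i 0 = 1 ∧ k ≤ i + 1 ∧
      ∀ j ∈ PySem.List.pyRange 0 k 1, PySem.List.pyGetD a (i - j) 0 = j + 1
  then r + 1 else r

lemma solve_eq_fold (n k : Int) (a : List Int) :
    solve n k a = ((PySem.List.pyRange 1 n 1).foldl (stepA k a) (1, 0)).2 := rfl

lemma solve_alt_eq_fold (n k : Int) (a : List Int) :
    solve_alt n k a = (PySem.List.pyRange 1 n 1).foldl (stepB k a) 0 := rfl

-- the B-side displayed condition equals "k ≤ runLen" at a terminal 1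
lemma bcond_iff (k : Int) (a : List Int) (m : Nat) (h1 : a.getD (m+1) 0 = 1) :
    (k ≤ runLen a (m+1)) ↔
      (k ≤ ((m : Int) + 1) + 1 ∧
        ∀ j ∈ PySem.List.pyRange 0 k 1, PySem.List.pyGetD a (((m : Int) + 1) - j) 0 = j + 1) := by
  rw [runLen_char a (m+1) k]
  have hcast : ((m + 1 : Nat) : Int) = (m : Int) + 1 := by push_cast; ring
  constructor
  · intro ⟨hk, hall⟩
    refine ⟨by omega, ?_⟩
    intro j hj
    rw [PySem.List.mem_pyRange_one] at hj
    obtain ⟨hj0, hjk⟩ := hj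
    have hjm : j.toNat ≤ m + 1 := by omega
    have := hall j.toNat (by omega)
    have hidx : ((m : Int) + 1) - j = ((m + 1 - j.toNat : Nat) : Int) := by
      push_cast [Nat.cast_sub hjm]; omega
    rw [hidx, PySem.List.pyGetD_natCast]
    rw [h1] at this
    rw [this]; omega
  · intro ⟨hk, hall⟩
    refine ⟨by omega, ?_⟩
    intro j hj
    have hjm : j ≤ m + 1 := by omega
    have := hall (j : Int) (by rw [PySem.List.mem_pyRange_one]; omega)
    have hidx : ((m : Int) + 1) - (j : Int) = ((m + 1 - j : Nat) : Int) := by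
      push_cast [Nat.cast_sub hjm]; omega
    rw [hidx, PySem.List.pyGetD_natCast] at this
    rw [h1, this]; omega

-- one step of A from an invariant state: counter value and invariant preservation,
-- and agreement of the hit condition with B's condition
lemma main_invariant (k : Int) (a : List Int) : ∀ m : Nat,
    InvA a m (((PySem.List.pyRange 1 ((m : Int) + 1) 1).foldl (stepA k a) (1, 0)).1) ∧
    ((PySem.List.pyRange 1 ((m : Int) + 1) 1).foldl (stepA k a) (1, 0)).2 =
      (PySem.List.pyRange 1 ((m : Int) + 1) 1).foldl (stepB k a) 0 := by
  intro m
  induction m with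
  | zero =>
    rw [PySem.List.pyRange_one_eq_nil (by omega)]
    refine ⟨⟨by norm_num, ?_, ?_⟩, rfl⟩ <;> simp [runLen]
  | succ m ih =>
    obtain ⟨⟨hc1, hc2, hc3⟩, hr⟩ := ih
    have hsplit : PySem.List.pyRange 1 ((m : Int) + 1 + 1) 1
        = PySem.List.pyRange 1 ((m : Int) + 1) 1 ++ [(m : Int) + 1] := by
      exact PySem.List.pyRange_one_succ_right (by omega)
    push_cast [hsplit, List.foldl_append]
    set st := (PySem.List.pyRange 1 ((m : Int) + 1) 1).foldl (stepA k a) (1, 0) with hst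
    set r := (PySem.List.pyRange 1 ((m : Int) + 1) 1).foldl (stepB k a) 0 with hrdef
    -- rewrite the pyGetD indices to getD at Nat indices
    have hi1 : ((m : Int) + 1) - 1 = ((m : Nat) : Int) := by omega
    have hi2 : ((m : Int) + 1) = (((m + 1 : Nat)) : Int) := by push_cast; ring
    have hget1 : PySem.List.pyGetD a (((m : Int) + 1) - 1) 0 = a.getD m 0 := by
      rw [hi1, PySem.List.pyGetD_natCast]
    have hget2 : PySem.List.pyGetD a ((m : Int) + 1) 0 = a.getD (m+1) 0 := by
      rw [hi2, PySem.List.pyGetD_natCast]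
    -- the updated counter
    by_cases hd : a.getD m 0 - a.getD (m+1) 0 = 1
    · -- run extends: runLen (m+1) = runLen m + 1
      have hrun : runLen a (m+1) = runLen a m + 1 := by rw [runLen_succ, if_pos hd]
      have hcval : st.1 + 1 ≤ runLen a (m+1) := by omega
      by_cases ht : a.getD (m+1) 0 = 1
      · -- terminal 1: counter must be exactly the run length
        have hceq : st.1 = runLen a m := by
          by_contra hne
          have hlt : st.1 < runLen a m := by omega
          have := hc3 hlt
          omega
        have hcrun : st.1 + 1 = runLen a (m+1) := by omega
        have hcond := bcond_iff k a m ht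
        by_cases hk : k ≤ runLen a (m+1)
        · -- hit: A counts and resets; B counts
          have hA : stepA k a st ((m : Int) + 1) = (1, st.2 + 1) := by
            simp only [stepA, hget1, hget2]
            rw [if_pos hd, if_pos ⟨ht, by omega⟩]
          have hB : stepB k a r ((m : Int) + 1) = r + 1 := by
            simp only [stepB]
            rw [if_pos ⟨hget2.trans ht, (hcond.mp hk).1, (hcond.mp hk).2⟩]
          simp only [List.foldl_cons, List.foldl_nil]
          rw [hA, hB]
          refine ⟨⟨by norm_num, runLen_pos a (m+1), ?_⟩, by omega⟩
          intro _; omega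
        · -- terminal 1 but run too short: neither counts
          have hA : stepA k a st ((m : Int) + 1) = (st.1 + 1, st.2) := by
            simp only [stepA, hget1, hget2]
            rw [if_pos hd, if_neg (by intro ⟨_, hk'⟩; exact hk (by omega))]
          have hB : stepB k a r ((m : Int) + 1) = r := by
            simp only [stepB]
            rw [if_neg (by
              intro ⟨_, h2, h3⟩
              exact hk (hcond.mpr ⟨h2, h3⟩))]
          simp only [List.foldl_cons, List.foldl_nil]
          rw [hA, hB]
          refine ⟨⟨by omega, hcval, ?_⟩, by omega⟩
          intro _; omega
      · -- not a terminal: neither counts, counter grows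
        have hA : stepA k a st ((m : Int) + 1) = (st.1 + 1, st.2) := by
          simp only [stepA, hget1, hget2]
          rw [if_pos hd, if_neg (by intro ⟨h, _⟩; exact ht h)]
        have hB : stepB k a r ((m : Int) + 1) = r := by
          simp only [stepB]
          rw [if_neg (by intro ⟨h, _⟩; exact ht (by rw [← hget2]; exact h))]
        simp only [List.foldl_cons, List.foldl_nil]
        rw [hA, hB]
        refine ⟨⟨by omega, hcval, ?_⟩, by omega⟩
        intro hlt
        have : st.1 < runLen a m := by omega
        have := hc3 this
        omega
    · -- run breaks: counter resets to 1, runLen (m+1) = 1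
      have hrun : runLen a (m+1) = 1 := by rw [runLen_succ, if_neg hd]
      by_cases ht : a.getD (m+1) 0 = 1
      · have hcond := bcond_iff k a m ht
        by_cases hk : k ≤ (1 : Int)
        · have hA : stepA k a st ((m : Int) + 1) = (1, st.2 + 1) := by
            simp only [stepA, hget1, hget2]
            rw [if_neg hd, if_pos ⟨ht, hk⟩]
          have hB : stepB k a r ((m : Int) + 1) = r + 1 := by
            have hk' : k ≤ runLen a (m+1) := by omega
            simp only [stepB]
            rw [if_pos ⟨hget2.trans ht, (hcond.mp hk').1, (hcond.mp hk').2⟩]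
          simp only [List.foldl_cons, List.foldl_nil]
          rw [hA, hB]
          refine ⟨⟨by norm_num, by omega, ?_⟩, by omega⟩
          intro _; omega
        · have hA : stepA k a st ((m : Int) + 1) = (1, st.2) := by
            simp only [stepA, hget1, hget2]
            rw [if_neg hd, if_neg (by intro ⟨_, hk'⟩; exact hk hk')]
          have hB : stepB k a r ((m : Int) + 1) = r := by
            simp only [stepB]
            rw [if_neg (by
              intro ⟨_, h2, h3⟩
              exact hk (by rw [← hrun]; exact hcond.mpr ⟨h2, h3⟩))]
          simp only [List.foldl_cons, List.foldl_nil]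
          rw [hA, hB]
          refine ⟨⟨by norm_num, by omega, ?_⟩, by omega⟩
          intro _; omega
      · have hA : stepA k a st ((m : Int) + 1) = (1, st.2) := by
          simp only [stepA, hget1, hget2]
          rw [if_neg hd, if_neg (by intro ⟨h, _⟩; exact ht h)]
        have hB : stepB k a r ((m : Int) + 1) = r := by
          simp only [stepB]
          rw [if_neg (by intro ⟨h, _⟩; exact ht (by rw [← hget2]; exact h))]
        simp only [List.foldl_cons, List.foldl_nil]
        rw [hA, hB]
        refine ⟨⟨by norm_num, by omega, ?_⟩, by omega⟩
        intro _; omega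

-- ===== VERDICT (by name: the statement is the Claim_ definition above) =====
theorem solve_spec : Claim_equal_solve := by
  intro n k a _ _
  unfold Spec_solve
  rw [solve_eq_fold, solve_alt_eq_fold]
  by_cases hn : n ≤ 1
  · rw [PySem.List.pyRange_one_eq_nil hn]
    rfl
  · have h1 : (((n - 1).toNat : Int)) + 1 = n := by omega
    have := (main_invariant k a (n - 1).toNat).2
    rw [h1] at this
    exact this
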